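-- pv_equiv track=rewrite | github.com/iiZlatanov/SoftUni | PY-Fundamentals/Homework/04. Functions Exercise/10. Array Manipulator (not included in final score).py | min_even_or_odd_command
-- ===== SOURCE A (Python) =====
-- def min_even_or_odd_command(current_array_state: list, even_or_odd: str):
--     if even_or_odd == "even":
--         list_of_all_even_numbers = []
--         for number in current_array_state:
--             if number % 2 == 0:
--                 list_of_all_even_numbers.append(number)
--         if len(list_of_all_even_numbers) == 0:
--             return "No matches"
--         else:
--             min_even_number = min(list_of_all_even_numbers)
--             index_counter = 0
--             result_index = 0
--             for number in current_array_state: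
--                 if number == min_even_number:
--                     result_index = index_counter
--                 index_counter += 1
--             return result_index
--
--     elif even_or_odd == "odd":
--         list_of_all_odd_numbers = []
--         for number in current_array_state:
--             if number % 2 != 0:
--                 list_of_all_odd_numbers.append(number)
--         if len(list_of_all_odd_numbers) == 0:
--             return "No matches"
--         else:
--             min_odd_number = min(list_of_all_odd_numbers)
--             index_counter = 0
--             result_index = 0
--             for number in current_array_state:
--                 if number == min_odd_number:
--                     result_index = index_counter
--                 index_counter += 1
--             return result_index
-- ===== SOURCE B (Python) =====
-- def _scan(numbers, parity):
--     # single pass: track min value of the parity class and its last index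
--     found = False
--     best_value = 0
--     best_index = 0
--     for index, number in enumerate(numbers):
--         if number % 2 == parity:
--             if not found or number < best_value:
--                 found = True
--                 best_value = number
--                 best_index = index
--             elif number == best_value:
--                 best_index = index
--     if not found:
--         return "No matches"
--     return best_index
--
--
-- def min_even_or_odd_command(current_array_state: list, even_or_odd: str):
--     if even_or_odd == "even":
--         return _scan(current_array_state, 0)
--     elif even_or_odd == "odd":
--         return _scan(current_array_state, 1)
-- ===== Notes on version B (the rewrite author's own statement) =====
-- stated objective: alternative
-- what changed: Replaces A's three passes per branch (filter the parity class, take min, rescan for the last index) by one enumerate pass keeping (found, best_value, best_index), updating the index on ties.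
-- outside the precondition, e.g. on min_even_or_odd_command([1], 'even'): A returns 'No matches', B returns 'No matches'
import Mathlib
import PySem

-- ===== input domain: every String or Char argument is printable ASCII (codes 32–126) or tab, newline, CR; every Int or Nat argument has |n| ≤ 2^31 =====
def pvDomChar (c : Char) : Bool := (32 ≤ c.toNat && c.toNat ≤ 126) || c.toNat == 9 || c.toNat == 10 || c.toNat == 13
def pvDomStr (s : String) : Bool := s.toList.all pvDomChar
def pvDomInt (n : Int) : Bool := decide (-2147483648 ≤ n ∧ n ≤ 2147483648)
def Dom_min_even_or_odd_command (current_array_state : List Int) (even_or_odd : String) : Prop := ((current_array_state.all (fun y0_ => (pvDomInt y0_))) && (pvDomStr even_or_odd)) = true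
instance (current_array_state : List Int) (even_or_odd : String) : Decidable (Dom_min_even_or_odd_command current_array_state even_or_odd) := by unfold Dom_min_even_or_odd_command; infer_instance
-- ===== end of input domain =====

-- B replaces A's filter-then-min-then-rescan (three passes per branch) by one enumerate
-- pass keeping (found, best_value, best_index); same return value on Pre_.

-- ===== PORT A =====
-- A's append loop building the list of matching numbers
def pvAFilter (p : Int → Bool) (xs : List Int) : List Int :=
  xs.foldl (fun acc n => if p n then acc ++ [n] else acc) []

-- A's second loop: (index_counter, result_index) over the list
def pvAScan (m : Int) (st : Int × Int) (xs : List Int) : Int × Int :=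
  xs.foldl (fun pr n => (pr.1 + 1, if n == m then pr.1 else pr.2)) st

def min_even_or_odd_command (current_array_state : List Int) (even_or_odd : String) : Option Int :=
  if even_or_odd == "even" then
    let evens := pvAFilter (fun n => PySem.Int.mod n 2 == 0) current_array_state
    if evens.length == 0 then none  -- Python returns the string "No matches" (not an Int); excluded by Pre_
    else match PySem.List.min? evens (fun y => y) with
      | none => none  -- unreachable: evens nonempty
      | some m => some ((pvAScan m (0, 0) current_array_state).2)
  else if even_or_odd == "odd" then
    let odds := pvAFilter (fun n => PySem.Int.mod n 2 != 0) current_array_state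
    if odds.length == 0 then none  -- Python returns the string "No matches" (not an Int); excluded by Pre_
    else match PySem.List.min? odds (fun y => y) with
      | none => none  -- unreachable: odds nonempty
      | some m => some ((pvAScan m (0, 0) current_array_state).2)
  else none

-- ===== PORT B =====
-- one step of B's single pass; state = (found, best_value, best_index)
def pvStep (p : Int → Bool) (st : Bool × Int × Int) (q : Int × Int) : Bool × Int × Int :=
  if p q.2 then
    if st.1 = false ∨ q.2 < st.2.1 then (true, q.2, q.1)
    else if q.2 == st.2.1 then (st.1, st.2.1, q.1)
    else st
  else st

-- B's helper _scan(numbers, parity)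
def pvScanB (numbers : List Int) (parity : Int) : Option Int :=
  let st := (PySem.List.enumerate numbers 0).foldl
      (pvStep (fun n => PySem.Int.mod n 2 == parity)) (false, 0, 0)
  if st.1 then some st.2.2 else none  -- "No matches" (a string) rendered as none; excluded by Pre_

def min_even_or_odd_command_alt (current_array_state : List Int) (even_or_odd : String) : Option Int :=
  if even_or_odd == "even" then pvScanB current_array_state 0
  else if even_or_odd == "odd" then pvScanB current_array_state 1
  else none

-- ===== PRECONDITION & SPEC =====
-- Pre_ excludes exactly the inputs on which A returns the string "No matches"
-- (a str, not a value of the declared Option Int type): "even"/"odd" with no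
-- element of that parity in the list.
def Pre_min_even_or_odd_command (current_array_state : List Int) (even_or_odd : String) : Prop :=
  (even_or_odd = "even" → ∃ n ∈ current_array_state, PySem.Int.mod n 2 = 0) ∧
  (even_or_odd = "odd" → ∃ n ∈ current_array_state, PySem.Int.mod n 2 ≠ 0)

instance (current_array_state : List Int) (even_or_odd : String) : Decidable (Pre_min_even_or_odd_command current_array_state even_or_odd) := by unfold Pre_min_even_or_odd_command; infer_instance

def pvWitness_min_even_or_odd_command : List Int × String := ([2, 3], "even")

def Spec_min_even_or_odd_command (current_array_state : List Int) (even_or_odd : String) (out : Option Int) : Prop := out = min_even_or_odd_command_alt current_array_state even_or_odd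
instance (current_array_state : List Int) (even_or_odd : String) (out : Option Int) : Decidable (Spec_min_even_or_odd_command current_array_state even_or_odd out) := by unfold Spec_min_even_or_odd_command; infer_instance

-- ===== CLAIM (what is proved, stated in full; the proofs are below) =====
def Claim_equal_min_even_or_odd_command : Prop := ∀ (current_array_state : List Int) (even_or_odd : String), Dom_min_even_or_odd_command current_array_state even_or_odd → Pre_min_even_or_odd_command current_array_state even_or_odd → Spec_min_even_or_odd_command current_array_state even_or_odd (min_even_or_odd_command current_array_state even_or_odd)

-- ===== LEMMAS AND PROOFS =====

-- A's append loop is List.filter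
theorem pvAFilter_eq_filter (p : Int → Bool) (xs : List Int) :
    pvAFilter p xs = xs.filter p := by
  have h : ∀ (l : List Int) (acc : List Int),
      l.foldl (fun acc n => if p n then acc ++ [n] else acc) acc = acc ++ l.filter p := by
    intro l
    induction l with
    | nil => intro acc; simp
    | cons x t ih =>
      intro acc
      by_cases hx : p x
      · simp [List.foldl, hx, ih]
      · simp [List.foldl, hx, ih]
  simpa using h xs []

-- running min of (m :: filter p l)
def pvMin (p : Int → Bool) (l : List Int) (m : Int) : Int :=
  (l.filter p).foldl min m

theorem pvAScan_cons (m : Int) (st : Int × Int) (x : Int) (l : List Int) :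
    pvAScan m st (x :: l) = pvAScan m (st.1 + 1, if x == m then st.1 else st.2) l := rfl

theorem foldl_min_le (fl : List Int) (m : Int) : fl.foldl min m ≤ m := by
  induction fl generalizing m with
  | nil => simp
  | cons h t ih => exact le_trans (ih (min m h)) (min_le_left _ _)

theorem foldl_min_mem (fl : List Int) (m : Int) :
    fl.foldl min m = m ∨ fl.foldl min m ∈ fl := by
  induction fl generalizing m with
  | nil => simp
  | cons h t ih =>
    rcases ih (min m h) with he | hm
    · rw [List.foldl_cons, he]
      rcases min_choice m h with hc | hc
      · exact Or.inl hc
      · exact Or.inr (by rw [hc]; exact List.mem_cons_self)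
    · exact Or.inr (by rw [List.foldl_cons]; exact List.mem_cons_of_mem _ hm)

theorem p_foldl_min (p : Int → Bool) (fl : List Int) (m : Int)
    (hfl : ∀ x ∈ fl, p x = true) (hm : p m = true) :
    p (fl.foldl min m) = true := by
  induction fl generalizing m with
  | nil => simpa using hm
  | cons h t ih =>
    have hh : p h = true := hfl h (by simp)
    have hmin : p (min m h) = true := by
      rcases min_choice m h with hc | hc
      · rw [hc]; exact hm
      · rw [hc]; exact hh
    simpa [List.foldl] using ih (min m h) (fun x hx => hfl x (by simp [hx])) hmin

theorem p_pvMin (p : Int → Bool) (l : List Int) (m : Int) (hm : p m = true) :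
    p (pvMin p l m) = true := by
  exact p_foldl_min p _ m (fun x hx => (List.mem_filter.mp hx).2) hm

theorem pvMin_mem (p : Int → Bool) (l : List Int) (m : Int) :
    pvMin p l m = m ∨ pvMin p l m ∈ l := by
  rcases foldl_min_mem (l.filter p) m with h | h
  · exact Or.inl h
  · exact Or.inr (List.mem_of_mem_filter h)

-- last-index scan: the initial result index is irrelevant once m occurs in l
theorem pvAScan_irrel (m : Int) (l : List Int) (s j j' : Int) (hmem : m ∈ l) :
    (pvAScan m (s, j) l).2 = (pvAScan m (s, j') l).2 := by
  induction l generalizing s j j' with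
  | nil => simp at hmem
  | cons x t ih =>
    rw [pvAScan_cons, pvAScan_cons]
    by_cases hx : (x == m) = true
    · simp [hx]
    · rw [if_neg hx, if_neg hx]
      have hmt : m ∈ t := by
        rcases List.mem_cons.mp hmem with he | ht
        · exact absurd (by simp [he]) hx
        · exact ht
      exact ih (s + 1) j j' hmt

-- B's pass from a found-state computes the running min and its last index
theorem pvMin_cons_pos (p : Int → Bool) (x : Int) (t : List Int) (m : Int) (hp : p x = true) :
    pvMin p (x :: t) m = pvMin p t (min m x) := by
  simp [pvMin, hp]

theorem pvMin_cons_neg (p : Int → Bool) (x : Int) (t : List Int) (m : Int) (hp : p x = false) :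
    pvMin p (x :: t) m = pvMin p t m := by
  simp [pvMin, hp]

theorem pvStep_true (p : Int → Bool) (l : List Int) (s m j : Int) (hm : p m = true) :
    (PySem.List.enumerate l s).foldl (pvStep p) (true, m, j) =
      (true, pvMin p l m, (pvAScan (pvMin p l m) (s, j) l).2) := by
  induction l generalizing s m j with
  | nil => simp [PySem.List.enumerate_nil, pvMin, pvAScan]
  | cons x t ih =>
    rw [PySem.List.enumerate_cons, List.foldl_cons]
    by_cases hp : p x = true
    · by_cases hlt : x < m
      · have hstep : pvStep p (true, m, j) (s, x) = (true, x, s) := by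
          simp [pvStep, hp, hlt]
        rw [hstep, ih (s + 1) x s hp,
          pvMin_cons_pos p x t m hp, min_eq_right (le_of_lt hlt), pvAScan_cons]
        by_cases hxM : (x == pvMin p t x) = true
        · simp [hxM]
        · rw [if_neg hxM]
          have hmem : pvMin p t x ∈ t := by
            rcases pvMin_mem p t x with he | hmm
            · exact absurd (by simp [he]) hxM
            · exact hmm
          simp only [Prod.mk.injEq, true_and]
          exact pvAScan_irrel _ t (s + 1) s j hmem
      · have hmin : min m x = m := min_eq_left (le_of_not_gt hlt)
        by_cases heq : (x == m) = true
        · have hstep : pvStep p (true, m, j) (s, x) = (true, m, s) := by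
            simp [pvStep, hp, hlt, heq]
          rw [hstep, ih (s + 1) m s hm, pvMin_cons_pos p x t m hp, hmin, pvAScan_cons]
          by_cases hxM : (x == pvMin p t m) = true
          · simp [hxM]
          · rw [if_neg hxM]
            have hne : pvMin p t m ≠ m := by
              intro hc
              have hx : x = m := by simpa using heq
              exact hxM (by simp [hx, hc])
            have hmem : pvMin p t m ∈ t := by
              rcases pvMin_mem p t m with he | hmm
              · exact absurd he hne
              · exact hmm
            simp only [Prod.mk.injEq, true_and]
            exact pvAScan_irrel _ t (s + 1) s j hmem
        · have hstep : pvStep p (true, m, j) (s, x) = (true, m, j) := by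
            simp [pvStep, hp, hlt, heq]
          rw [hstep, ih (s + 1) m j hm, pvMin_cons_pos p x t m hp, hmin, pvAScan_cons]
          have hxM : (x == pvMin p t m) = false := by
            have hle : pvMin p t m ≤ m := foldl_min_le _ _
            have hmx : m < x := lt_of_le_of_ne (le_of_not_gt hlt) (by
              intro hc; exact heq (by simp [hc.symm]))
            have : x ≠ pvMin p t m := by omega
            simpa using this
          rw [hxM]
          simp
    · have hpf : p x = false := by simpa using hp
      have hstep : pvStep p (true, m, j) (s, x) = (true, m, j) := by
        simp [pvStep, hpf]
      rw [hstep, ih (s + 1) m j hm, pvMin_cons_neg p x t m hpf, pvAScan_cons]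
      have hxM : (x == pvMin p t m) = false := by
        have hpM : p (pvMin p t m) = true := p_pvMin p t m hm
        have : x ≠ pvMin p t m := by
          intro hc; rw [hc] at hpf; rw [hpf] at hpM; exact Bool.false_ne_true hpM
        simpa using this
      rw [hxM]
      simp

-- min of the nonempty filtered list, as A computes it
def pvMinF (p : Int → Bool) (l : List Int) : Int :=
  match l.filter p with
  | [] => 0
  | h :: t => t.foldl min h

theorem pvMainF (p : Int → Bool) (l : List Int) (s : Int) (h : l.filter p ≠ []) :
    (PySem.List.enumerate l s).foldl (pvStep p) (false, 0, 0) =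
      (true, pvMinF p l, (pvAScan (pvMinF p l) (s, 0) l).2) := by
  induction l generalizing s with
  | nil => simp at h
  | cons x t ih =>
    rw [PySem.List.enumerate_cons, List.foldl_cons]
    by_cases hp : p x = true
    · have hstep : pvStep p (false, 0, 0) (s, x) = (true, x, s) := by
        simp [pvStep, hp]
      rw [hstep, pvStep_true p t (s + 1) x s hp]
      have hMF : pvMinF p (x :: t) = pvMin p t x := by
        simp [pvMinF, pvMin, hp]
      rw [hMF, pvAScan_cons]
      by_cases hxM : (x == pvMin p t x) = true
      · simp [hxM]
      · rw [if_neg hxM]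
        have hmem : pvMin p t x ∈ t := by
          rcases pvMin_mem p t x with he | hmm
          · exact absurd (by simp [he]) hxM
          · exact hmm
        simp only [Prod.mk.injEq, true_and]
        exact pvAScan_irrel _ t (s + 1) s 0 hmem
    · have hpf : p x = false := by simpa using hp
      have hstep : pvStep p (false, 0, 0) (s, x) = (false, 0, 0) := by
        simp [pvStep, hpf]
      have hft : t.filter p ≠ [] := by
        intro hc
        exact h (by simp [hpf, hc])
      rw [hstep, ih (s + 1) hft]
      have hMF : pvMinF p (x :: t) = pvMinF p t := by
        simp [pvMinF, hpf]
      rw [hMF, pvAScan_cons]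
      have hpM : p (pvMinF p t) = true := by
        rcases hfl : t.filter p with _ | ⟨a, ta⟩
        · exact absurd hfl hft
        · have ha : p a = true := (List.mem_filter.mp (hfl ▸ List.mem_cons_self)).2
          have hta : ∀ y ∈ ta, p y = true := fun y hy =>
            (List.mem_filter.mp (hfl ▸ List.mem_cons_of_mem a hy)).2
          simpa [pvMinF, hfl] using p_foldl_min p ta a hta ha
      have hxM : (x == pvMinF p t) = false := by
        have : x ≠ pvMinF p t := by
          intro hc; rw [hc] at hpf; rw [hpf] at hpM; exact Bool.false_ne_true hpM
        simpa using this
      rw [hxM]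
      simp

-- generic branch equivalence: A's three passes = B's single pass
theorem pvBranch (p : Int → Bool) (xs : List Int) (h : ∃ n ∈ xs, p n = true) :
    (if (pvAFilter p xs).length == 0 then (none : Option Int)
     else match PySem.List.min? (pvAFilter p xs) (fun y => y) with
       | none => none
       | some m => some ((pvAScan m (0, 0) xs).2)) =
    (if ((PySem.List.enumerate xs 0).foldl (pvStep p) (false, 0, 0)).1 = true
     then some (((PySem.List.enumerate xs 0).foldl (pvStep p) (false, 0, 0)).2.2)
     else none) := by
  obtain ⟨n, hn, hpn⟩ := h
  have hne : xs.filter p ≠ [] := by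
    intro hc
    have hm : n ∈ xs.filter p := List.mem_filter.mpr ⟨hn, hpn⟩
    rw [hc] at hm
    simp at hm
  rw [pvMainF p xs 0 hne, pvAFilter_eq_filter p xs]
  rcases hfl : xs.filter p with _ | ⟨a, t⟩
  · exact absurd hfl hne
  · have hM : pvMinF p xs = t.foldl min a := by simp [pvMinF, hfl]
    simp [PySem.List.min?_id_cons, hM]

-- ===== VERDICT (by name: the statement is the Claim_ definition above) =====
theorem min_even_or_odd_command_spec : Claim_equal_min_even_or_odd_command := by
  unfold Claim_equal_min_even_or_odd_command
  intro xs s _ hpre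
  unfold Spec_min_even_or_odd_command
  by_cases he : s = "even"
  · subst he
    have h : ∃ n ∈ xs, (PySem.Int.mod n 2 == 0) = true := by
      obtain ⟨n, hn, hmod⟩ := hpre.1 rfl
      exact ⟨n, hn, by rw [hmod]; decide⟩
    have hb := pvBranch (fun n => PySem.Int.mod n 2 == 0) xs h
    simpa [min_even_or_odd_command, min_even_or_odd_command_alt, pvScanB] using hb
  · by_cases ho : s = "odd"
    · subst ho
      have hfun : (fun n : Int => n % 2 != 0) = (fun n : Int => n % 2 == 1) := by
        funext n
        rcases Int.emod_two_eq n with hm | hm <;> rw [hm] <;> decide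
      have h : ∃ n ∈ xs, (PySem.Int.mod n 2 == 1) = true := by
        obtain ⟨n, hn, hmod⟩ := hpre.2 rfl
        rcases PySem.Int.mod_two_eq n with hm | hm
        · exact absurd hm hmod
        · exact ⟨n, hn, by rw [hm]; decide⟩
      have hb := pvBranch (fun n => PySem.Int.mod n 2 == 1) xs h
      simpa [min_even_or_odd_command, min_even_or_odd_command_alt, pvScanB, hfun, he] using hb
    · simp [min_even_or_odd_command, min_even_or_odd_command_alt, he, ho]
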